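-- pv_equiv track=rewrite | github.com/GenomeNet/Genome-NAS | darts_tools/comp_aux.py | get_w_pos
-- ===== SOURCE A (Python) =====
-- def get_w_pos(cnn_steps, switch_cnn):
--
--     start = 0
--     n = 2
--     idxs = [0]
--     idx = 0
--
--     for i in range(cnn_steps-1):
--
--         end = start + n
--
--         for j in range(start, end):
--             if switch_cnn[j].count(False) != len(switch_cnn[j]):
--                 idx += 1
--
--
--         idxs.append(idx)
--         start = end
--
--         n += 1
--
--     return idxs
-- ===== SOURCE B (Python) =====
-- def get_w_pos(cnn_steps, switch_cnn):
--     # total rows needed: 2 + 3 + ... + cnn_steps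
--     total = cnn_steps * (cnn_steps + 1) // 2 - 1 if cnn_steps >= 2 else 0
--     # prefix[t] = number of non-all-False rows among the first t rows
--     prefix = [0]
--     for j in range(total):
--         row = switch_cnn[j]
--         prefix.append(prefix[-1] + (1 if row.count(False) != len(row) else 0))
--     # sample the prefix table at the triangular block boundaries
--     return [0] + [prefix[(i + 2) * (i + 3) // 2 - 1] for i in range(cnn_steps - 1)]
-- ===== Notes on version B (the rewrite author's own statement) =====
-- stated objective: alternative
-- what changed: A's inline per-block accumulation (nested loops mutating start/n/idx) is replaced by building a prefix-count table of non-all-False rows once and sampling it at closed-form triangular boundary indices (i+2)(i+3)/2-1.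
import Mathlib
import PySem

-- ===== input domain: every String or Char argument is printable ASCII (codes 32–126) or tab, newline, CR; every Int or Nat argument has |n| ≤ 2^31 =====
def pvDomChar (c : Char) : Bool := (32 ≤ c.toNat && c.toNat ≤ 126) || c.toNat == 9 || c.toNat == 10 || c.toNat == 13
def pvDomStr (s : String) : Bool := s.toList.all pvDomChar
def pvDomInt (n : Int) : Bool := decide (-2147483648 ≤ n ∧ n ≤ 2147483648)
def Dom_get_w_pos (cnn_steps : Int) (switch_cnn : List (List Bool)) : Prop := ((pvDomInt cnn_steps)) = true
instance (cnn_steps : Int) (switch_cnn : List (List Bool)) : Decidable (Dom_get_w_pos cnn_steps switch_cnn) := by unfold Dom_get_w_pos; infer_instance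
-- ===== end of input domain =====

-- B replaces A's inline per-block counting with a pref-count table sampled at
-- closed-form triangular boundary indices (objective: alternative decomposition, same cost).

-- ===== PORT A =====
def get_w_pos (cnn_steps : Int) (switch_cnn : List (List Bool)) : List Int :=
  let st :=
    (PySem.List.pyRange 0 (cnn_steps - 1) 1).foldl
      (fun (st : Int × Int × List Int × Int) _i =>
        let start := st.1
        let n := st.2.1
        let idxs := st.2.2.1
        let idx0 := st.2.2.2
        let e := start + n
        let idx :=
          (PySem.List.pyRange start e 1).foldl
            (fun (idx : Int) j =>
              let row := (PySem.List.pyGet? switch_cnn j).getD []   -- IndexError excluded by Pre_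
              if PySem.List.count row false ≠ row.length then idx + 1 else idx)
            idx0
        (e, n + 1, idxs ++ [idx], idx))
      (0, 2, [0], 0)
  st.2.2.1

-- ===== PORT B =====
def get_w_pos_alt (cnn_steps : Int) (switch_cnn : List (List Bool)) : List Int :=
  let total : Int := if 2 ≤ cnn_steps then PySem.Int.floordiv (cnn_steps * (cnn_steps + 1)) 2 - 1 else 0
  let pref :=
    (PySem.List.pyRange 0 total 1).foldl
      (fun (pre : List Int) j =>
        let row := (PySem.List.pyGet? switch_cnn j).getD []   -- IndexError excluded by Pre_
        pre ++ [(PySem.List.pyGet? pre (-1)).getD 0 +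
                (if PySem.List.count row false ≠ row.length then 1 else 0)])
      [0]
  [0] ++ (PySem.List.pyRange 0 (cnn_steps - 1) 1).map
      (fun i => (PySem.List.pyGet? pref (PySem.Int.floordiv ((i + 2) * (i + 3)) 2 - 1)).getD 0)

-- ===== PRECONDITION & SPEC =====
-- Pre_ excludes exactly the inputs where Python A raises IndexError: fewer than
-- 2 + 3 + … + cnn_steps rows (i.e. 2*len + 2 < cnn_steps*(cnn_steps+1)) when cnn_steps ≥ 2.
def Pre_get_w_pos (cnn_steps : Int) (switch_cnn : List (List Bool)) : Prop :=
  2 ≤ cnn_steps → cnn_steps * (cnn_steps + 1) ≤ 2 * (switch_cnn.length : Int) + 2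
instance (cnn_steps : Int) (switch_cnn : List (List Bool)) : Decidable (Pre_get_w_pos cnn_steps switch_cnn) := by unfold Pre_get_w_pos; infer_instance

def pvWitness_get_w_pos : Int × List (List Bool) :=
  (3, [[true, false], [false], [false, true], [true], [false]])

def Spec_get_w_pos (cnn_steps : Int) (switch_cnn : List (List Bool)) (out : List Int) : Prop := out = get_w_pos_alt cnn_steps switch_cnn
instance (cnn_steps : Int) (switch_cnn : List (List Bool)) (out : List Int) : Decidable (Spec_get_w_pos cnn_steps switch_cnn out) := by unfold Spec_get_w_pos; infer_instance

-- ===== CLAIM (what is proved, stated in full; the proofs are below) =====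
def Claim_equal_get_w_pos : Prop := ∀ (cnn_steps : Int) (switch_cnn : List (List Bool)), Dom_get_w_pos cnn_steps switch_cnn → Pre_get_w_pos cnn_steps switch_cnn → Spec_get_w_pos cnn_steps switch_cnn (get_w_pos cnn_steps switch_cnn)

-- ===== LEMMAS AND PROOFS =====

-- 0/1 flag of row j (0 also for out-of-range j, which Pre_ keeps unreachable)
def pvFlag (sc : List (List Bool)) (j : Int) : Int :=
  let row := (PySem.List.pyGet? sc j).getD []
  if PySem.List.count row false ≠ row.length then 1 else 0

-- pref count: number of flagged rows among the first t
def pvF (sc : List (List Bool)) (t : Nat) : Int :=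
  ((PySem.List.pyRange 0 (t : Int) 1).map (pvFlag sc)).sum

-- triangular boundary: pvS m = 2 + 3 + … + (m+1)
def pvS : Nat → Nat
  | 0 => 0
  | m + 1 => pvS m + (m + 2)

theorem pvS_mono : ∀ {i j : Nat}, i ≤ j → pvS i ≤ pvS j := by
  intro i j h
  induction j with
  | zero => simp_all
  | succ j ih =>
    rcases Nat.lt_or_ge i (j+1) with h' | h'
    · exact le_trans (ih (Nat.lt_succ_iff.mp h')) (by simp [pvS])
    · have : i = j + 1 := le_antisymm h h'
      simp [this]

theorem pvS_closed (m : Nat) : (2 * (pvS m : Int)) = (m : Int) * ((m : Int) + 3) := by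
  induction m with
  | zero => simp [pvS]
  | succ m ih => simp only [pvS]; push_cast; push_cast at ih; linear_combination ih

theorem pvF_succ (sc : List (List Bool)) (t : Nat) :
    pvF sc (t + 1) = pvF sc t + pvFlag sc t := by
  unfold pvF
  push_cast
  rw [PySem.List.pyRange_one_succ_right (by positivity)]
  simp

-- generic: a count-if fold is the initial value plus the sum of the 0/1 flags
theorem foldl_flag (sc : List (List Bool)) (l : List Int) :
    ∀ idx : Int,
      l.foldl (fun (idx : Int) j =>
          if PySem.List.count ((PySem.List.pyGet? sc j).getD []) false
              ≠ ((PySem.List.pyGet? sc j).getD []).length then idx + 1 else idx) idx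
        = idx + (l.map (pvFlag sc)).sum := by
  induction l with
  | nil => intro idx; simp
  | cons x t ih =>
    intro idx
    simp only [List.foldl_cons, List.map_cons, List.sum_cons, ih]
    unfold pvFlag
    by_cases h : PySem.List.count ((PySem.List.pyGet? sc x).getD []) false
        ≠ ((PySem.List.pyGet? sc x).getD []).length
    · simp only [if_pos h]; ring
    · simp only [if_neg h]; ring

-- sum of flags over a sub-range is a difference of pref counts
theorem flag_range_sum (sc : List (List Bool)) (a b : Nat) (hab : a ≤ b) :
    ((PySem.List.pyRange (a : Int) (b : Int) 1).map (pvFlag sc)).sum = pvF sc b - pvF sc a := by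
  unfold pvF
  rw [PySem.List.pyRange_one_append 0 (a : Int) (b : Int) (by positivity) (by exact_mod_cast hab)]
  simp

-- the outer loop invariant of A
theorem outerA (sc : List (List Bool)) (m : Nat) :
    (PySem.List.pyRange 0 (m : Int) 1).foldl
      (fun (st : Int × Int × List Int × Int) _i =>
        let start := st.1
        let n := st.2.1
        let idxs := st.2.2.1
        let idx0 := st.2.2.2
        let e := start + n
        let idx :=
          (PySem.List.pyRange start e 1).foldl
            (fun (idx : Int) j =>
              let row := (PySem.List.pyGet? sc j).getD []
              if PySem.List.count row false ≠ row.length then idx + 1 else idx)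
            idx0
        (e, n + 1, idxs ++ [idx], idx))
      (0, 2, [0], 0)
    = ((pvS m : Int), (m : Int) + 2,
       0 :: (List.range m).map (fun i => pvF sc (pvS (i + 1))), pvF sc (pvS m)) := by
  induction m with
  | zero => simp [PySem.List.pyRange_zero, pvS, pvF]
  | succ m ih =>
    rw [show ((m + 1 : Nat) : Int) = (m : Int) + 1 by push_cast; ring,
        PySem.List.pyRange_one_succ_right (by positivity), List.foldl_append, ih]
    simp only [List.foldl_cons, List.foldl_nil]
    have hS : ((pvS m : Int)) + ((m : Int) + 2) = ((pvS (m + 1) : Nat) : Int) := by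
      push_cast [pvS]; ring
    rw [foldl_flag, hS, flag_range_sum sc (pvS m) (pvS (m+1)) (pvS_mono (Nat.le_succ m))]
    simp only [Prod.mk.injEq, List.range_succ, List.map_append, List.map_cons, List.map_nil,
      List.cons_append]
    refine ⟨trivial, by ring, by simp, by ring⟩

-- the pref-table loop of B builds the table of pref counts
theorem prefB (sc : List (List Bool)) (T : Nat) :
    (PySem.List.pyRange 0 (T : Int) 1).foldl
      (fun (pre : List Int) j =>
        pre ++ [(PySem.List.pyGet? pre (-1)).getD 0 +
                (if PySem.List.count ((PySem.List.pyGet? sc j).getD []) false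
                    ≠ ((PySem.List.pyGet? sc j).getD []).length then 1 else 0)])
      [0]
    = (List.range (T + 1)).map (fun k => pvF sc k) := by
  induction T with
  | zero => simp [PySem.List.pyRange_zero, pvF]
  | succ T ih =>
    rw [show ((T + 1 : Nat) : Int) = (T : Int) + 1 by push_cast; ring,
        PySem.List.pyRange_one_succ_right (by positivity), List.foldl_append, ih]
    simp only [List.foldl_cons, List.foldl_nil]
    have hlast : (PySem.List.pyGet? ((List.range (T + 1)).map (fun k => pvF sc k)) (-1)).getD 0
        = pvF sc T := by
      rw [PySem.List.pyGet?_neg_one]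
      rw [List.getLast?_eq_getElem?]
      simp [List.range_succ]
    rw [hlast]
    have : pvF sc T + (if PySem.List.count ((PySem.List.pyGet? sc (T : Int)).getD []) false
        ≠ ((PySem.List.pyGet? sc (T : Int)).getD []).length then 1 else 0) = pvF sc (T + 1) := by
      rw [pvF_succ]; rfl
    rw [this, List.range_succ (n := T + 1)]
    simp

theorem floordiv_two_shift (a : Int) : PySem.Int.floordiv (2 * a + 2) 2 = a + 1 := by
  rw [PySem.Int.floordiv_eq_ediv_of_pos (by norm_num)]
  omega

-- ===== VERDICT (by name: the statement is the Claim_ definition above) =====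
theorem get_w_pos_spec : Claim_equal_get_w_pos := by
  intro cs sc _hdom _hpre
  unfold Spec_get_w_pos get_w_pos get_w_pos_alt
  rcases le_or_gt cs 1 with hle | hgt
  · have h1 : PySem.List.pyRange 0 (cs - 1) 1 = [] := PySem.List.pyRange_one_eq_nil (by omega)
    have h2 : PySem.List.pyRange 0 (0 : Int) 1 = [] := PySem.List.pyRange_one_eq_nil (by omega)
    rw [if_neg (by omega)]
    simp [h1, h2]
  · -- cs ≥ 2; let m = cs - 1 ≥ 1
    obtain ⟨m, hm⟩ : ∃ m : Nat, (m : Int) = cs - 1 := ⟨(cs - 1).toNat, by omega⟩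
    rw [if_pos (by omega)]
    have htot : PySem.Int.floordiv (cs * (cs + 1)) 2 - 1 = ((pvS m : Nat) : Int) := by
      have h2 : cs * (cs + 1) = 2 * ((pvS m : Int)) + 2 := by
        have hc := pvS_closed m
        have hcs : cs = (m : Int) + 1 := by omega
        rw [hcs]; nlinarith [hc]
      rw [h2, floordiv_two_shift]; ring
    rw [htot, ← hm, outerA]
    dsimp only []
    simp only [prefB]
    simp only [List.cons_append, List.nil_append]
    congr 1
    rw [PySem.List.pyRange_one 0 ((m : Int))]
    simp only [Int.sub_zero, Int.toNat_natCast, List.map_map]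
    apply List.map_congr_left
    intro k hk
    have hkm : k < m := List.mem_range.mp hk
    simp only [Function.comp]
    have hb : PySem.Int.floordiv ((0 + (k : Int) + 2) * ((0 + (k : Int)) + 3)) 2 - 1
        = ((pvS (k + 1) : Nat) : Int) := by
      have h2 : (0 + (k : Int) + 2) * ((0 + (k : Int)) + 3) = 2 * ((pvS (k + 1) : Int)) + 2 := by
        have hc := pvS_closed (k + 1)
        push_cast at hc
        nlinarith [hc]
      rw [h2, floordiv_two_shift]; ring
    rw [hb, PySem.List.pyGet?_natCast]
    have hlt : pvS (k + 1) < pvS m + 1 := by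
      have := pvS_mono (show k + 1 ≤ m by omega)
      omega
    simp [hlt]
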